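-- pv_equiv track=rewrite | github.com/gahvs/ciencia-da-computacao | Recursão/Python/removeImparesRecursivo.py | removeImpar
-- ===== SOURCE A (Python) =====
-- def removeImpar(list):
--
--     if len(list) == 0:
--         return []
--
--     if list[0] % 2 == 0:
--         _list = [list[0]]
--         return _list + removeImpar(list[1:])
--     else:
--         return removeImpar(list[1:])
-- ===== SOURCE B (Python) =====
-- def removeImpar(list):
--     result = []
--     for x in list:
--         if x % 2 == 0:
--             result.append(x)
--     return result
-- ===== Notes on version B (the rewrite author's own statement) =====
-- stated objective: faster
-- what changed: Replaced the recursion over list[1:] slices (which copies the tail at every step) with a single iterative loop appending even elements to an accumulator.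
import Mathlib
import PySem

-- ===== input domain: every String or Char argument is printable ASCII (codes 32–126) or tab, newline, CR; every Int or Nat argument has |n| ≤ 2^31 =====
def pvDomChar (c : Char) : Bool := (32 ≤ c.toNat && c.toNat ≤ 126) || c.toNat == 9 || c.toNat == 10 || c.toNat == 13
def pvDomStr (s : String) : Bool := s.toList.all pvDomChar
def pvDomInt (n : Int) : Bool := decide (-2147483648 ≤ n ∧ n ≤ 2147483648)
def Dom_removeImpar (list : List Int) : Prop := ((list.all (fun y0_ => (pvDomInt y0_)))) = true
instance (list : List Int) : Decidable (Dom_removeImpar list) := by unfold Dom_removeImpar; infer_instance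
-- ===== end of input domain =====

-- B replaces A's recursion over tail slices with one iterative accumulator loop (simpler).


-- ===== PORT A =====
-- A: if the list is empty return []; if the head is even, [head] ++ recurse on the tail; else recurse on the tail.
def removeImpar (list : List Int) : List Int :=
  match list with
  | [] => []
  | x :: rest =>
    if PySem.Int.mod x 2 == 0 then
      [x] ++ removeImpar rest
    else
      removeImpar rest

-- ===== PORT B =====
-- B: iterate over the list, appending each even element to an accumulator (fold over the same state).
def removeImpar_alt (list : List Int) : List Int :=
  list.foldl (fun result x => if PySem.Int.mod x 2 == 0 then result ++ [x] else result) []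

-- ===== PRECONDITION & SPEC =====
def Spec_removeImpar (list : List Int) (out : List Int) : Prop := out = removeImpar_alt list
instance (list : List Int) (out : List Int) : Decidable (Spec_removeImpar list out) := by unfold Spec_removeImpar; infer_instance

-- ===== CLAIM (what is proved, stated in full; the proofs are below) =====
def Claim_equal_removeImpar : Prop := ∀ (list : List Int), Dom_removeImpar list → Spec_removeImpar list (removeImpar list)

-- ===== LEMMAS AND PROOFS =====
theorem removeImpar_foldl (list : List Int) (acc : List Int) :
    list.foldl (fun result x => if PySem.Int.mod x 2 == 0 then result ++ [x] else result) acc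
      = acc ++ removeImpar list := by
  induction list generalizing acc with
  | nil => simp [removeImpar]
  | cons x rest ih =>
    simp only [List.foldl_cons, removeImpar]
    by_cases h : PySem.Int.mod x 2 == 0 <;> simp only [h, if_pos, if_neg, ih, List.append_assoc, Bool.false_eq_true, if_false, if_true, List.singleton_append]

-- ===== VERDICT (by name: the statement is the Claim_ definition above) =====
theorem removeImpar_spec : Claim_equal_removeImpar := by
  intro list _
  unfold Spec_removeImpar removeImpar_alt
  rw [removeImpar_foldl]
  simp
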